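-- pv_equiv track=rewrite | github.com/gregoryrcapra/EulerProblems | Euler56.py | geometricSum
-- ===== SOURCE A (Python) =====
-- def geometricSum(baseNum,exponentLimit):
--     currentGeoSum = 0
--     maxDigSum = 0
--     for exponentNum in range(exponentLimit):
--         if exponentNum == 0:
--             newSum = 1
--         elif baseNum == 1:
--             newSum = 1
--         else:
--             newSum = 1-((1-baseNum)*currentGeoSum)
--         currentGeoSum += newSum
--         maxDigSum = max(maxDigSum,digitSum(newSum))
--     return maxDigSum
--
-- def digitSum(num):
--     sumOfDigits = 0
--     for char in str(num):
--         sumOfDigits += int(char)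
--     return sumOfDigits
-- ===== SOURCE B (Python) =====
-- def geometricSum(baseNum, exponentLimit):
--     # Keep a running power of baseNum (no geometric-sum accumulator, no branches)
--     # and take the digit sum arithmetically (no string conversion).
--     maxDigSum = 0
--     power = 1
--     for _ in range(exponentLimit):
--         n = abs(power)
--         s = 0
--         while n:
--             s += n % 10
--             n //= 10
--         maxDigSum = max(maxDigSum, s)
--         power *= baseNum
--     return maxDigSum
-- ===== Notes on version B (the rewrite author's own statement) =====
-- stated objective: simpler
-- what changed: B drops A's maintained geometric-sum accumulator with its three-way newSum branch, maintaining a running power of baseNum instead, and replaces the string-based digit sum by arithmetic %10 // 10 accumulation.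
import Mathlib
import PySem

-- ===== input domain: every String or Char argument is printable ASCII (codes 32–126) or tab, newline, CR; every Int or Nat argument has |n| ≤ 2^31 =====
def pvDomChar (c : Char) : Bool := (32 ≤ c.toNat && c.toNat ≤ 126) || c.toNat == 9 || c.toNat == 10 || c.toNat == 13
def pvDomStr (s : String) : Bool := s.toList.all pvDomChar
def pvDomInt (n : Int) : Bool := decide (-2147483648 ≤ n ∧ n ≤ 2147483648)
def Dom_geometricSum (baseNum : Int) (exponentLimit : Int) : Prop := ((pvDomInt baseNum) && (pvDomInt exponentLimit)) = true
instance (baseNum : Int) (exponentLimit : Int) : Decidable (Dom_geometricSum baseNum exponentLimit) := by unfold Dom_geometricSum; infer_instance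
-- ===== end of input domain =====

-- B maintains a running power of baseNum and sums digits arithmetically, instead of
-- A's maintained geometric-sum accumulator with three branches and a string digit sum (objective: simpler).


-- ===== PORT A =====
-- helper digitSum: sumOfDigits += int(char) for char in str(num).
-- int('-') raises ValueError (ofChars? = none); Pre_ excludes those inputs, so getD 0 is unreachable there.
def digitSumA (num : Int) : Int :=
  (PySem.Int.toChars num).foldl (fun sumOfDigits c => sumOfDigits + ((PySem.Int.ofChars? [c]).getD 0)) 0

def geometricSum (baseNum : Int) (exponentLimit : Int) : Int :=
  ((PySem.List.pyRange 0 exponentLimit).foldl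
    (fun (st : Int × Int) (exponentNum : Int) =>
      let newSum : Int :=
        if exponentNum = 0 then 1
        else if baseNum = 1 then 1
        else 1 - ((1 - baseNum) * st.1)
      (st.1 + newSum, max st.2 (digitSumA newSum)))
    (0, 0)).2

-- ===== PORT B =====
-- the while loop: s += n % 10; n //= 10 until n == 0, as structural recursion on a fuel
-- counter (fuel = the initial n bounds the number of iterations; it only makes the loop total)
def digSumGo : Nat → Nat → Int
  | 0, _ => 0
  | fuel + 1, n => if n = 0 then 0 else ((n % 10 : Nat) : Int) + digSumGo fuel (n / 10)

def digSumNatB (n : Nat) : Int := digSumGo n n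

-- the for loop: state (maxDigSum, power); the loop variable is unused in the body
def geometricSum_alt (baseNum : Int) (exponentLimit : Int) : Int :=
  ((PySem.List.pyRange 0 exponentLimit).foldl
    (fun (st : Int × Int) (_ : Int) =>
      (max st.1 (digSumNatB st.2.natAbs), st.2 * baseNum))
    (0, 1)).1

-- ===== PRECONDITION & SPEC =====
-- Pre_ excludes exactly the inputs where A raises: baseNum < 0 with exponentLimit ≥ 2 makes
-- digitSum receive a negative power, and int('-') raises ValueError.
def Pre_geometricSum (baseNum : Int) (exponentLimit : Int) : Prop :=
  0 ≤ baseNum ∨ exponentLimit ≤ 1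
instance (baseNum : Int) (exponentLimit : Int) : Decidable (Pre_geometricSum baseNum exponentLimit) := by unfold Pre_geometricSum; infer_instance
def pvWitness_geometricSum : Int × Int := (3, 5)

def Spec_geometricSum (baseNum : Int) (exponentLimit : Int) (out : Int) : Prop := out = geometricSum_alt baseNum exponentLimit
instance (baseNum : Int) (exponentLimit : Int) (out : Int) : Decidable (Spec_geometricSum baseNum exponentLimit out) := by unfold Spec_geometricSum; infer_instance

-- ===== CLAIM (what is proved, stated in full; the proofs are below) =====
def Claim_equal_geometricSum : Prop := ∀ (baseNum : Int) (exponentLimit : Int), Dom_geometricSum baseNum exponentLimit → Pre_geometricSum baseNum exponentLimit → Spec_geometricSum baseNum exponentLimit (geometricSum baseNum exponentLimit)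

-- ===== LEMMAS AND PROOFS =====

-- range(L) as a mapped List.range
lemma pyRange_toNat (L : Int) :
    PySem.List.pyRange 0 L = (List.range L.toNat).map (Nat.cast : Nat → Int) := by
  by_cases h : 0 ≤ L
  · have : L = ((L.toNat : Nat) : Int) := (Int.toNat_of_nonneg h).symm
    rw [this, PySem.List.pyRange_zero_natCast, Int.toNat_natCast]
  · have h0 : L.toNat = 0 := Int.toNat_of_nonpos (by omega)
    simp [PySem.List.pyRange, h0, show ¬ (0 : Int) < L by omega]

-- the fuel argument of digSumGo is irrelevant once it is ≥ n
lemma digSumGo_fuel (f1 : Nat) : ∀ (f2 n : Nat), n ≤ f1 → n ≤ f2 → digSumGo f1 n = digSumGo f2 n := by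
  induction f1 with
  | zero =>
    intro f2 n h1 _
    have : n = 0 := by omega
    subst this
    cases f2 <;> simp [digSumGo]
  | succ f1 ih =>
    intro f2 n h1 h2
    cases f2 with
    | zero =>
      have : n = 0 := by omega
      subst this; simp [digSumGo]
    | succ f2 =>
      by_cases hn : n = 0
      · subst hn; simp [digSumGo]
      · have hlt : n / 10 < n := Nat.div_lt_self (Nat.pos_of_ne_zero hn) (by norm_num)
        simp only [digSumGo, hn, if_false]
        rw [ih f2 (n / 10) (by omega) (by omega)]

lemma digSumNatB_zero : digSumNatB 0 = 0 := rfl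

lemma digSumNatB_pos (n : Nat) (hn : n ≠ 0) :
    digSumNatB n = ((n % 10 : Nat) : Int) + digSumNatB (n / 10) := by
  obtain ⟨m, rfl⟩ : ∃ m, n = m + 1 := ⟨n - 1, by omega⟩
  have hlt : (m + 1) / 10 < m + 1 := Nat.div_lt_self (by omega) (by norm_num)
  unfold digSumNatB
  simp only [digSumGo, hn, if_false]
  rw [digSumGo_fuel m ((m + 1) / 10) ((m + 1) / 10) (by omega) le_rfl]

-- value of one decimal digit character under int(char)
lemma ofChars_digitChar (d : Nat) (hd : d < 10) :
    (PySem.Int.ofChars? [Nat.digitChar d]).getD 0 = (d : Int) := by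
  interval_cases d <;> decide

-- digit-char sum produced by toDigitsCore equals the arithmetic digit sum
lemma toDigitsCore_sum (fuel : Nat) :
    ∀ (n : Nat) (acc : List Char), n < fuel →
      ((Nat.toDigitsCore 10 fuel n acc).map
        (fun c => (PySem.Int.ofChars? [c]).getD 0)).sum
      = digSumNatB n + (acc.map (fun c => (PySem.Int.ofChars? [c]).getD 0)).sum := by
  induction fuel with
  | zero => intro n acc h; omega
  | succ fuel ih =>
    intro n acc h
    rw [Nat.toDigitsCore]
    by_cases h0 : n / 10 = 0
    · simp only [h0, if_true]
      have hdn : digSumNatB n = ((n % 10 : Nat) : Int) := by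
        by_cases hn : n = 0
        · subst hn; simp [digSumNatB_zero]
        · rw [digSumNatB_pos n hn, h0, digSumNatB_zero]; ring
      simp only [List.map_cons, List.sum_cons]
      rw [ofChars_digitChar (n % 10) (by omega), hdn]
    · simp only [h0, if_false]
      have hn : n ≠ 0 := by intro hc; subst hc; simp at h0
      have hlt : n / 10 < fuel := by
        have : n / 10 < n := Nat.div_lt_self (Nat.pos_of_ne_zero hn) (by norm_num)
        omega
      rw [ih (n / 10) _ hlt]
      have hdn : digSumNatB n = ((n % 10 : Nat) : Int) + digSumNatB (n / 10) :=
        digSumNatB_pos n hn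
      rw [hdn]
      simp only [List.map_cons, List.sum_cons]
      rw [ofChars_digitChar (n % 10) (by omega)]
      ring

-- A's string digit sum agrees with B's arithmetic one on nonnegative inputs
lemma digitSumA_eq (num : Int) (h : 0 ≤ num) : digitSumA num = digSumNatB num.natAbs := by
  unfold digitSumA
  rw [PySem.List.foldl_add]
  have hneg : ¬ num < 0 := not_lt.mpr h
  simp only [PySem.Int.toChars, hneg, if_false]
  rw [Nat.toDigits, toDigitsCore_sum (num.toNat + 1) num.toNat [] (by omega)]
  have : num.toNat = num.natAbs := by omega
  simp [this]

-- A's loop in closed form: the accumulator is a geometric sum and every newSum is baseNum ^ exponent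
lemma geometricSum_fold (b : Int) (n : Nat) :
    ((List.range n).map (Nat.cast : Nat → Int)).foldl
      (fun (st : Int × Int) (exponentNum : Int) =>
        let newSum : Int :=
          if exponentNum = 0 then 1
          else if b = 1 then 1
          else 1 - ((1 - b) * st.1)
        (st.1 + newSum, max st.2 (digitSumA newSum)))
      (0, 0)
    = (∑ i ∈ Finset.range n, b ^ i,
       (List.range n).foldl (fun m i => max m (digitSumA (b ^ i))) 0) := by
  induction n with
  | zero => simp
  | succ n ih =>
    rw [List.range_succ, List.map_append, List.foldl_append, ih, List.foldl_append]
    simp only [List.map_cons, List.map_nil, List.foldl_cons, List.foldl_nil]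
    have hnew : (if (n : Int) = 0 then (1 : Int)
        else if b = 1 then 1
        else 1 - ((1 - b) * ∑ i ∈ Finset.range n, b ^ i)) = b ^ n := by
      split_ifs with h1 h2
      · have : n = 0 := by exact_mod_cast h1
        simp [this]
      · simp [h2]
      · have := geom_sum_mul b n
        nlinarith [this]
    simp only [hnew, Finset.sum_range_succ]

-- B's loop in closed form: the second component is the running power baseNum ^ n
lemma geometricSum_alt_fold (b : Int) (n : Nat) :
    ((List.range n).map (Nat.cast : Nat → Int)).foldl
      (fun (st : Int × Int) (_ : Int) =>
        (max st.1 (digSumNatB st.2.natAbs), st.2 * b))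
      (0, 1)
    = ((List.range n).foldl (fun m i => max m (digSumNatB (b ^ i).natAbs)) 0, b ^ n) := by
  induction n with
  | zero => simp
  | succ n ih =>
    rw [List.range_succ, List.map_append, List.foldl_append, ih, List.foldl_append]
    simp [pow_succ]

-- ===== VERDICT (by name: the statement is the Claim_ definition above) =====
theorem geometricSum_spec : Claim_equal_geometricSum := by
  intro b L _ hpre
  unfold Spec_geometricSum geometricSum geometricSum_alt
  rw [pyRange_toNat, geometricSum_fold, geometricSum_alt_fold]
  show List.foldl _ 0 _ = List.foldl _ 0 _
  apply PySem.List.foldl_congr_mem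
  intro acc x hx
  have hx' : x < L.toNat := List.mem_range.mp hx
  have hpow : 0 ≤ b ^ x := by
    rcases hpre with hb | hL
    · positivity
    · have : x = 0 := by omega
      simp [this]
  rw [digitSumA_eq _ hpow]
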